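-- pv_equiv track=rewrite | github.com/MaksimFomin06/Yandex_Lyceum | django_otbor/3.py | find
-- ===== SOURCE A (Python) =====
-- from typing import Iterable
--
-- def find(k: int, m: int, iterable: Iterable[int]) -> int:
--     lst = list(iterable)
--     n = len(lst)
--     if n < k:
--         return -1
--     for i in range(n - k + 1):
--         total_sum = sum(lst[i:i+k])
--         if total_sum == m:
--             return i
--     return -1
-- ===== SOURCE B (Python) =====
-- def find(k, m, iterable):
--     lst = list(iterable)
--     n = len(lst)
--     if n < k:
--         return -1
--     pref = [0]
--     acc = 0
--     for x in lst:
--         acc += x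
--         pref.append(acc)
--     for i, (lo, hi) in enumerate(zip(pref, pref[k:])):
--         if hi - lo == m:
--             return i
--     return -1
-- ===== Notes on version B (the rewrite author's own statement) =====
-- stated objective: faster
-- what changed: Builds a prefix-sum array in one pass and then scans pairs (pref[i], pref[i+k]) once, so each window sum is a single subtraction instead of A's sum over a fresh slice.
-- outside the precondition, e.g. on find(-1, 0, [1, 2]): A returns 1, B returns -1; on find(-2, -1, [1, -1]): A returns -1, B returns 1
import Mathlib
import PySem

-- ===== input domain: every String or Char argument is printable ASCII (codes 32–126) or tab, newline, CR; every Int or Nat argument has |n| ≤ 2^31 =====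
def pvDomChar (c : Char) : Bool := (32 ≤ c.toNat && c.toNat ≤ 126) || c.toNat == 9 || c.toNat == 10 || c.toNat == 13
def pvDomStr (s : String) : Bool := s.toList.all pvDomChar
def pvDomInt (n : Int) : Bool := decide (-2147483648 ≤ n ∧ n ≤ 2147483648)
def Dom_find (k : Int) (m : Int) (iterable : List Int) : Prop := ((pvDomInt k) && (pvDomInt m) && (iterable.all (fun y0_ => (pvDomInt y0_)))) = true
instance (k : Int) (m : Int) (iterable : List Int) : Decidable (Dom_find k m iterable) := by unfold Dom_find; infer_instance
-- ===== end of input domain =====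

-- B builds a prefix-sum array once and scans pairs (pref[i], pref[i+k]): each window
-- sum is one subtraction instead of A's sum over a fresh slice (asymptotically faster).

-- ===== PORT A =====
-- A's 'for i in range(n - k + 1)' loop with early return, as structural recursion over the range list
def findLoopA (lst : List Int) (k m : Int) : List Int → Int
  | [] => -1
  | i :: rest =>
      let total_sum := (PySem.List.slice lst (some i) (some (i + k))).sum
      if total_sum = m then i else findLoopA lst k m rest

def find (k : Int) (m : Int) (iterable : List Int) : Int :=
  let lst := iterable
  let n : Int := lst.length
  if n < k then -1
  else findLoopA lst k m (PySem.List.pyRange 0 (n - k + 1) 1)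

-- ===== PORT B =====
-- Source B's 'for x in lst: acc += x; pref.append(acc)' (the non-zero tail of pref)
def buildPref : List Int → Int → List Int
  | [], _ => []
  | x :: rest, acc => (acc + x) :: buildPref rest (acc + x)

-- Source B's 'for i, (lo, hi) in enumerate(zip(pref, pref[k:]))' with early return
def scanPairs (m : Int) : Int → List (Int × Int) → Int
  | _, [] => -1
  | i, (lo, hi) :: rest => if hi - lo = m then i else scanPairs m (i + 1) rest

def find_alt (k : Int) (m : Int) (iterable : List Int) : Int :=
  let lst := iterable
  let n : Int := lst.length
  if n < k then -1
  else
    let pref := 0 :: buildPref lst 0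
    scanPairs m 0 (pref.zip (PySem.List.slice pref (some k) none))

-- ===== PRECONDITION & SPEC =====
-- Pre_ excludes negative window sizes k < 0, a degenerate corner where both programs' values are
-- artefacts (A: Python's negative-slice clamping per window; B: pref[k:] slicing from the end) and
-- no value is the specified one.
def Pre_find (k : Int) (m : Int) (iterable : List Int) : Prop := 0 ≤ k
instance (k : Int) (m : Int) (iterable : List Int) : Decidable (Pre_find k m iterable) := by unfold Pre_find; infer_instance
def pvWitness_find : Int × Int × List Int := (2, 5, [1, 4, 2, 3])

def Spec_find (k : Int) (m : Int) (iterable : List Int) (out : Int) : Prop := out = find_alt k m iterable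
instance (k : Int) (m : Int) (iterable : List Int) (out : Int) : Decidable (Spec_find k m iterable out) := by unfold Spec_find; infer_instance

-- ===== CLAIM (what is proved, stated in full; the proofs are below) =====
def Claim_equal_find : Prop := ∀ (k : Int) (m : Int) (iterable : List Int), Dom_find k m iterable → Pre_find k m iterable → Spec_find k m iterable (find k m iterable)

-- ===== LEMMAS AND PROOFS =====

lemma buildPref_length (lst : List Int) (acc : Int) : (buildPref lst acc).length = lst.length := by
  induction lst generalizing acc with
  | nil => rfl
  | cons x rest ih => simp [buildPref, ih]

lemma buildPref_get (lst : List Int) (acc : Int) (i : Nat) (h : i < lst.length) :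
    (buildPref lst acc)[i]'(by rw [buildPref_length]; exact h) = acc + (lst.take (i + 1)).sum := by
  induction lst generalizing acc i with
  | nil => simp at h
  | cons x rest ih =>
      cases i with
      | zero => simp [buildPref]
      | succ j =>
          have := ih (acc + x) j (by simpa using h)
          simp [buildPref, this]; ring

lemma pref_length (lst : List Int) : (0 :: buildPref lst 0).length = lst.length + 1 := by
  simp [buildPref_length]

lemma pref_get (lst : List Int) (i : Nat) (h : i ≤ lst.length) :
    (0 :: buildPref lst 0)[i]'(by rw [pref_length]; omega) = (lst.take i).sum := by
  cases i with
  | zero => simp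
  | succ j =>
      have hj : j < lst.length := by omega
      have := buildPref_get lst 0 j hj
      simpa using this

-- the window sum as a difference of prefix sums
lemma window_sum (lst : List Int) (j kn : Nat) :
    ((lst.drop j).take kn).sum = (lst.take (j + kn)).sum - (lst.take j).sum := by
  rw [List.take_add, List.sum_append]; ring

-- B's pair scan over the zipped prefix tails equals A's remaining loop over window starts [j, n-kn]
lemma pv_main (lst : List Int) (kn : Nat) (m : Int) (hkn : kn ≤ lst.length) :
    ∀ (d j : Nat), j + d = lst.length + 1 - kn →
      scanPairs m (j : Int)
        (((0 :: buildPref lst 0).drop j).zip ((0 :: buildPref lst 0).drop (j + kn))) =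
      findLoopA lst (kn : Int) m (PySem.List.pyRange (j : Int) ((lst.length : Int) - (kn : Int) + 1) 1) := by
  intro d
  set pref := 0 :: buildPref lst 0 with hpref
  have hlen : pref.length = lst.length + 1 := pref_length lst
  induction d with
  | zero =>
      intro j hj
      have e1 : pref.drop (j + kn) = [] := by
        apply List.drop_eq_nil_of_le; omega
      have e2 : PySem.List.pyRange ((j : Int)) ((lst.length : Int) - (kn : Int) + 1) 1 = [] := by
        rw [PySem.List.pyRange_one]
        have : ((lst.length : Int) - (kn : Int) + 1 - (j : Int)).toNat = 0 := by omega
        rw [this]; simp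
      rw [e1, e2]
      simp [scanPairs, findLoopA]
  | succ d ih =>
      intro j hj
      have hj1 : j < pref.length := by omega
      have hj2 : j + kn < pref.length := by omega
      have c1 : pref.drop j = pref[j] :: pref.drop (j + 1) := List.drop_eq_getElem_cons hj1
      have c2 : pref.drop (j + kn) = pref[j + kn] :: pref.drop (j + kn + 1) := List.drop_eq_getElem_cons hj2
      rw [PySem.List.pyRange_one_cons (show (j : Int) < (lst.length : Int) - (kn : Int) + 1 by omega)]
      rw [c1, c2]
      simp only [List.zip_cons_cons, scanPairs, findLoopA]
      have ga : (PySem.List.slice lst (some (j : Int)) (some ((j : Int) + (kn : Int)))).sum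
          = pref[j + kn]'hj2 - pref[j]'hj1 := by
        rw [PySem.List.slice_natCast_add, window_sum,
            ← pref_get lst (j + kn) (by omega), ← pref_get lst j (by omega)]
      rw [ga]
      by_cases hm : pref[j + kn]'hj2 - pref[j]'hj1 = m
      · simp [hm]
      · simp only [hm, if_false]
        have r1 : (j : Int) + 1 = ((j + 1 : Nat) : Int) := by push_cast; ring
        have r2 : j + kn + 1 = (j + 1) + kn := by omega
        rw [r1, r2]
        exact ih (j + 1) (by omega)

-- ===== VERDICT (by name: the statement is the Claim_ definition above) =====
theorem find_spec : Claim_equal_find := by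
  intro k m lst _ hpre
  unfold Spec_find find find_alt
  simp only []
  obtain ⟨kn, rfl⟩ : ∃ kn : Nat, k = (kn : Int) := ⟨k.toNat, (Int.toNat_of_nonneg hpre).symm⟩
  by_cases hn : (lst.length : Int) < (kn : Int)
  · rw [if_pos hn, if_pos hn]
  · rw [if_neg hn, if_neg hn]
    have hkn : kn ≤ lst.length := by omega
    rw [PySem.List.slice_from_natCast]
    have h := pv_main lst kn m hkn (lst.length + 1 - kn) 0 (by omega)
    simp only [List.drop_zero, Nat.zero_add, Nat.cast_zero] at h
    exact h.symm
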